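-- pv_equiv track=rewrite | github.com/Scleverlin/Verilog_Basic_Circuits | Approximate_Multiplier/anx.py | calculate_An_x
-- ===== SOURCE A (Python) =====
-- def calculate_An_x(n, x, memo=None):
--     if memo is None:
--         memo = {}
--
--     if (n, x) in memo:
--         return memo[(n, x)]
--
--     if n <= x:
--         result = 2 ** n
--     else:
--         result = sum(calculate_An_x(n - 1 - j, x, memo) for j in range(x + 1))
--
--     memo[(n, x)] = result
--     return result
-- ===== SOURCE B (Python) =====
-- def calculate_An_x(n, x, memo=None):
--     # Bottom-up: a single loop maintaining a sliding-window running sum of the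
--     # last x+1 values (A recurses top-down over the same recurrence).
--     if memo is None:
--         memo = {}
--     if (n, x) in memo:
--         return memo[(n, x)]
--     if n <= x:
--         result = 2 ** n
--     elif x < 0:
--         result = 0
--     else:
--         vals = []
--         s = 0  # running sum of the last x+1 entries of vals
--         for m in range(n + 1):
--             v = memo.get((m, x))
--             if v is None:
--                 v = 2 ** m if m <= x else s
--             vals.append(v)
--             s += v
--             if m > x:
--                 s -= vals[m - x - 1]
--         result = vals[n]
--     memo[(n, x)] = result
--     return result
-- ===== Notes on version B (the rewrite author's own statement) =====
-- stated objective: alternative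
-- what changed: Replaces A's top-down memoized recursion (each level re-sums the previous x+1 terms) by a single bottom-up loop maintaining a sliding-window running sum of the last x+1 values.
-- outside the precondition, e.g. on calculate_An_x(-1, 3, None): A returns 0.5, B returns 0.5; on calculate_An_x(3000, 0, None): A returns 1, B returns 1
import Mathlib
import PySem

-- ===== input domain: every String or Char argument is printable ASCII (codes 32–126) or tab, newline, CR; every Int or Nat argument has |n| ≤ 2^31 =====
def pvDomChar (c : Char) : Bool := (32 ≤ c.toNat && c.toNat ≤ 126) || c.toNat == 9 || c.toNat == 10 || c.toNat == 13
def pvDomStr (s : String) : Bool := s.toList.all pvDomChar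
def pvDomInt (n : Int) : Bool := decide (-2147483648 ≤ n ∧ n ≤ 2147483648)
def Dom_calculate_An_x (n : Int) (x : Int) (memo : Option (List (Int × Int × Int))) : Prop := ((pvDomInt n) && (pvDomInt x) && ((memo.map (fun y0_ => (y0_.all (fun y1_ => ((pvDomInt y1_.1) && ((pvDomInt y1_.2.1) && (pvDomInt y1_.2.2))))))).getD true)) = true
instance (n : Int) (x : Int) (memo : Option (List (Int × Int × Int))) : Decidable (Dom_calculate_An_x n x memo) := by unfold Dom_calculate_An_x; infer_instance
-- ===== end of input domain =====

-- B replaces A's top-down memoized recursion by a bottom-up loop with a sliding-window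
-- running sum of the last x+1 values; equivalence is about the RETURN value only
-- (A fills the caller's memo dict with every intermediate key, B's Python only stores
-- final values it computed itself).

-- ===== PORT A =====
-- the memo dict (None -> {}) as a PySem.Dict keyed by the pair (n, x)
def pvMemoA (memo : Option (List (Int × Int × Int))) : PySem.Dict (Int × Int) Int :=
  PySem.Dict.mk ((memo.getD []).map (fun t => ((t.1, t.2.1), t.2.2)))

-- A's recursion, threading the mutated memo; `2 ** n` is ported as 2 ^ n.toNat,
-- exact for 0 ≤ n (for n < 0 Python's 2 ** n is a float, excluded by Pre_)
def pvGoA (x : Int) (n : Int) (d : PySem.Dict (Int × Int) Int) :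
    Int × PySem.Dict (Int × Int) Int :=
  match d.get? (n, x) with
  | some v => (v, d)
  | none =>
    let r : Int × PySem.Dict (Int × Int) Int :=
      if _h : n ≤ x then ((2:Int) ^ n.toNat, d)
      else
        (PySem.List.pyRange 0 (x + 1) 1).attach.foldl
          (fun acc j =>
            let p := pvGoA x (n - 1 - j.1) acc.2
            (acc.1 + p.1, p.2))
          (0, d)
    (r.1, r.2.insert (n, x) r.1)
termination_by n.toNat
decreasing_by
  have hj := PySem.List.mem_pyRange_one.mp j.2
  omega

def calculate_An_x (n : Int) (x : Int) (memo : Option (List (Int × Int × Int))) : Int :=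
  (pvGoA x n (pvMemoA memo)).1

-- ===== PORT B =====
def pvMemoB (memo : Option (List (Int × Int × Int))) : PySem.Dict (Int × Int) Int :=
  PySem.Dict.mk ((memo.getD []).map (fun t => ((t.1, t.2.1), t.2.2)))

-- B's loop body: state = (vals, running sum of the last x+1 entries of vals)
def pvStepB (x : Int) (d : PySem.Dict (Int × Int) Int)
    (st : List Int × Int) (m : Int) : List Int × Int :=
  let v : Int :=
    match d.get? (m, x) with
    | some v => v
    | none => if m ≤ x then (2:Int) ^ m.toNat else st.2
  let vals := st.1 ++ [v]
  let s := st.2 + v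
  let s := if m > x then s - PySem.List.pyGetD vals (m - x - 1) 0 else s
  (vals, s)

def calculate_An_x_alt (n : Int) (x : Int) (memo : Option (List (Int × Int × Int))) : Int :=
  let d := pvMemoB memo
  match d.get? (n, x) with
  | some v => v
  | none =>
    if n ≤ x then (2:Int) ^ n.toNat
    else if x < 0 then 0
    else
      let st := (PySem.List.pyRange 0 (n + 1) 1).foldl (pvStepB x d) ([], 0)
      PySem.List.pyGetD st.1 n 0

-- ===== PRECONDITION & SPEC =====
-- Pre_ excludes (1) the inputs on which Python A returns a float, not an int
-- (n < 0 with n ≤ x and (n, x) not a key of memo makes the base case 2 ** n a float), and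
-- (2) the deep-recursion inputs n > x + 2000 with 0 ≤ x and no memo hit at (n, x), on which
-- A overflows the interpreter's recursion limit (RecursionError); the bound is conservative
-- because the exact raising frontier depends on the memo contents, so it also excludes some
-- deep inputs on which A happens to return (e.g. x = 0, where every value is 1).
def Pre_calculate_An_x (n : Int) (x : Int) (memo : Option (List (Int × Int × Int))) : Prop :=
  (0 ≤ n ∨ x < n ∨ ((memo.getD []).any (fun t => t.1 == n && t.2.1 == x)) = true) ∧
  (n ≤ x + 2000 ∨ x < 0 ∨ ((memo.getD []).any (fun t => t.1 == n && t.2.1 == x)) = true)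
instance (n : Int) (x : Int) (memo : Option (List (Int × Int × Int))) : Decidable (Pre_calculate_An_x n x memo) := by unfold Pre_calculate_An_x; infer_instance

def pvWitness_calculate_An_x : Int × Int × (Option (List (Int × Int × Int))) :=
  (6, 1, some [(4, 1, 7)])

def Spec_calculate_An_x (n : Int) (x : Int) (memo : Option (List (Int × Int × Int))) (out : Int) : Prop := out = calculate_An_x_alt n x memo
instance (n : Int) (x : Int) (memo : Option (List (Int × Int × Int))) (out : Int) : Decidable (Spec_calculate_An_x n x memo out) := by unfold Spec_calculate_An_x; infer_instance

-- ===== CLAIM (what is proved, stated in full; the proofs are below) =====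
def Claim_equal_calculate_An_x : Prop := ∀ (n : Int) (x : Int) (memo : Option (List (Int × Int × Int))), Dom_calculate_An_x n x memo → Pre_calculate_An_x n x memo → Spec_calculate_An_x n x memo (calculate_An_x n x memo)

-- ===== LEMMAS AND PROOFS =====

-- the mathematical value both programs compute: the memo-overridden recurrence
def pvF (x : Int) (d : PySem.Dict (Int × Int) Int) (m : Int) : Int :=
  match d.get? (m, x) with
  | some v => v
  | none =>
    if _h : m ≤ x then (2:Int) ^ m.toNat
    else
      (PySem.List.pyRange 0 (x + 1) 1).attach.foldl
        (fun s j => s + pvF x d (m - 1 - j.1)) 0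
termination_by m.toNat
decreasing_by
  have hj := PySem.List.mem_pyRange_one.mp j.2
  omega

theorem pvF_of_get (x : Int) (d : PySem.Dict (Int × Int) Int) (m : Int) (v : Int)
    (h : d.get? (m, x) = some v) : pvF x d m = v := by
  rw [pvF.eq_def, h]

-- A-run invariant: the threaded memo extends the initial one and only ever
-- stores pvF-values at keys (·, x)
def pvInv (x : Int) (d d' : PySem.Dict (Int × Int) Int) : Prop :=
  ∀ m : Int, (∀ v, d.get? (m, x) = some v → d'.get? (m, x) = some v) ∧
             (∀ v, d'.get? (m, x) = some v → v = pvF x d m)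

theorem pvInv_insert (x : Int) (d dd : PySem.Dict (Int × Int) Int) (m : Int)
    (hInv : pvInv x d dd) (hdnone : d.get? (m, x) = none) :
    pvInv x d (dd.insert (m, x) (pvF x d m)) := by
  intro m'
  constructor
  · intro v hv
    rw [PySem.Dict.get?_insert]
    split
    · next heq =>
      have hm : m' = m := by
        have := congrArg Prod.fst heq; simpa using this
      subst hm
      exact absurd hv (by simp [hdnone])
    · exact (hInv m').1 v hv
  · intro v hv
    rw [PySem.Dict.get?_insert] at hv
    split at hv
    · next heq =>
      have hm : m' = m := by
        have := congrArg Prod.fst heq; simpa using this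
      subst hm
      simpa using hv.symm
    · exact (hInv m').2 v hv

theorem pvGoA_correct (x : Int) (d : PySem.Dict (Int × Int) Int) :
    ∀ (K : Nat) (m : Int) (d' : PySem.Dict (Int × Int) Int), m.toNat ≤ K →
      pvInv x d d' →
      (pvGoA x m d').1 = pvF x d m ∧ pvInv x d (pvGoA x m d').2 := by
  intro K
  induction K using Nat.strong_induction_on with
  | _ K IH =>
    intro m d' hm hInv
    rw [pvGoA.eq_def]
    cases hget : d'.get? (m, x) with
    | some v =>
      simp only
      exact ⟨((hInv m).2 v hget).symm ▸ rfl, hInv⟩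
    | none =>
      have hdnone : d.get? (m, x) = none := by
        cases hd : d.get? (m, x) with
        | none => rfl
        | some w => exact absurd ((hInv m).1 w hd) (by simp [hget])
      simp only
      by_cases hx : m ≤ x
      · simp only [dif_pos hx]
        have hv : pvF x d m = (2:Int) ^ m.toNat := by
          rw [pvF.eq_def, hdnone]; simp [hx]
        exact ⟨hv.symm, hv ▸ pvInv_insert x d d' m hInv hdnone⟩
      · simp only [dif_neg hx]
        -- the inner fold over the recursive calls
        have inner : ∀ (l : List {j // j ∈ PySem.List.pyRange 0 (x + 1) 1})
            (a : Int) (dd : PySem.Dict (Int × Int) Int), pvInv x d dd →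
            ((l.foldl (fun acc j =>
                let p := pvGoA x (m - 1 - j.1) acc.2
                (acc.1 + p.1, p.2)) (a, dd)).1
               = l.foldl (fun s j => s + pvF x d (m - 1 - j.1)) a)
            ∧ pvInv x d ((l.foldl (fun acc j =>
                let p := pvGoA x (m - 1 - j.1) acc.2
                (acc.1 + p.1, p.2)) (a, dd)).2) := by
          intro l
          induction l with
          | nil => intro a dd hdd; exact ⟨rfl, hdd⟩
          | cons j t ihl =>
            intro a dd hdd
            have hj := PySem.List.mem_pyRange_one.mp j.2
            have hrec := IH (m - 1 - j.1).toNat (by omega) (m - 1 - j.1) dd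
              (le_refl _) hdd
            simp only [List.foldl_cons]
            have h1 := (ihl (a + (pvGoA x (m - 1 - j.1) dd).1)
              ((pvGoA x (m - 1 - j.1) dd).2) hrec.2)
            rw [hrec.1] at h1 ⊢
            exact h1
        have hfold := inner (PySem.List.pyRange 0 (x + 1) 1).attach 0 d' hInv
        have hv : pvF x d m =
            (PySem.List.pyRange 0 (x + 1) 1).attach.foldl
              (fun s j => s + pvF x d (m - 1 - j.1)) 0 := by
          rw [pvF.eq_def, hdnone]; simp [hx]
        constructor
        · rw [hfold.1, hv]
        · have h1 : ((PySem.List.pyRange 0 (x + 1) 1).attach.foldl (fun acc j =>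
              let p := pvGoA x (m - 1 - j.1) acc.2
              (acc.1 + p.1, p.2)) (0, d')).1 = pvF x d m := by rw [hfold.1, hv]
          rw [h1]
          exact pvInv_insert x d _ m hfold.2 hdnone

theorem pvF_window (x : Int) (d : PySem.Dict (Int × Int) Int) (hx : 0 ≤ x)
    (m : Nat) (hm : x.toNat + 1 ≤ m) :
    (PySem.List.pyRange 0 (x + 1) 1).attach.foldl
        (fun s j => s + pvF x d ((m : Int) - 1 - j.1)) 0
      = ∑ i ∈ Finset.Ico (m - (x.toNat + 1)) m, pvF x d (i : Int) := by
  rw [List.foldl_attach (f := fun s z => s + pvF x d ((m : Int) - 1 - z)),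
      PySem.List.foldl_add, PySem.List.pyRange_one, List.map_map]
  have hxw : (x + 1 - 0).toNat = x.toNat + 1 := by omega
  rw [hxw]
  have hsum : (List.map ((fun j => pvF x d ((m : Int) - 1 - j)) ∘ fun k : Nat => 0 + (k : Int))
      (List.range (x.toNat + 1))).sum
      = ∑ j ∈ Finset.range (x.toNat + 1), pvF x d ((m : Int) - 1 - (j : Int)) := by
    simp only [Function.comp_def, zero_add]
    rfl
  rw [hsum, Finset.sum_Ico_eq_sum_range]
  have hb : m - (m - (x.toNat + 1)) = x.toNat + 1 := by omega
  rw [hb, ← Finset.sum_range_reflect, zero_add]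
  apply Finset.sum_congr rfl
  intro j hj
  simp only [Finset.mem_range] at hj
  congr 1
  push_cast
  omega

-- one step of B's loop advances the window invariant
theorem pvStepB_tail (x : Int) (d : PySem.Dict (Int × Int) Int) (hx : 0 ≤ x)
    (k : Nat) (v : Int) (hv : v = pvF x d (k : Int)) :
    (((List.range k).map (fun (i : Nat) => pvF x d (i : Int)) ++ [v],
      (if (k : Int) > x then
        ((∑ i ∈ Finset.Ico (k - (x.toNat + 1)) k, pvF x d (i : Int)) + v) -
          PySem.List.pyGetD ((List.range k).map (fun (i : Nat) => pvF x d (i : Int)) ++ [v])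
            ((k : Int) - x - 1) 0
      else (∑ i ∈ Finset.Ico (k - (x.toNat + 1)) k, pvF x d (i : Int)) + v))
      : List Int × Int)
    = ((List.range (k + 1)).map (fun (i : Nat) => pvF x d (i : Int)),
       ∑ i ∈ Finset.Ico (k + 1 - (x.toNat + 1)) (k + 1), pvF x d (i : Int)) := by
  subst hv
  have hvals : (List.range k).map (fun (i : Nat) => pvF x d (i : Int)) ++ [pvF x d (k : Int)]
      = (List.range (k + 1)).map (fun (i : Nat) => pvF x d (i : Int)) := by
    rw [List.range_succ, List.map_append]; rfl
  rw [hvals]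
  refine Prod.ext rfl ?_
  by_cases hk : (k : Int) > x
  · rw [if_pos hk]
    have hidx : (k : Int) - x - 1 = ((k - (x.toNat + 1) : Nat) : Int) := by
      omega
    have hlt : k - (x.toNat + 1) < k + 1 := by omega
    rw [hidx, PySem.List.pyGetD_natCast,
        PySem.List.getD_map_range (fun (i : Nat) => pvF x d (i : Int)) (k + 1) _ 0 hlt]
    have e1 : ∑ i ∈ Finset.Ico (k - (x.toNat + 1)) (k + 1), pvF x d (i : Int)
        = (∑ i ∈ Finset.Ico (k - (x.toNat + 1)) k, pvF x d (i : Int)) + pvF x d (k : Int) :=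
      Finset.sum_Ico_succ_top (by omega) _
    have e2 : ∑ i ∈ Finset.Ico (k - (x.toNat + 1)) (k + 1), pvF x d (i : Int)
        = pvF x d ((k - (x.toNat + 1) : Nat) : Int)
          + ∑ i ∈ Finset.Ico (k - (x.toNat + 1) + 1) (k + 1), pvF x d (i : Int) :=
      Finset.sum_eq_sum_Ico_succ_bot (by omega) _
    have e3 : k + 1 - (x.toNat + 1) = k - (x.toNat + 1) + 1 := by omega
    rw [e3]
    omega
  · rw [if_neg hk]
    have e0 : k - (x.toNat + 1) = 0 := by omega
    have e0' : k + 1 - (x.toNat + 1) = 0 := by omega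
    rw [e0, e0']
    exact (Finset.sum_Ico_succ_top (Nat.zero_le k) _).symm

theorem pvB_loop (x : Int) (d : PySem.Dict (Int × Int) Int) (hx : 0 ≤ x) :
    ∀ k : Nat,
      (PySem.List.pyRange 0 (k : Int) 1).foldl (pvStepB x d) ([], 0) =
        ((List.range k).map (fun (i : Nat) => pvF x d (i : Int)),
         ∑ i ∈ Finset.Ico (k - (x.toNat + 1)) k, pvF x d (i : Int)) := by
  intro k
  induction k with
  | zero => simp [PySem.List.pyRange_one_eq_nil]
  | succ k ih =>
    have hsplit : PySem.List.pyRange 0 ((k : Int) + 1) 1 =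
        PySem.List.pyRange 0 (k : Int) 1 ++ [(k : Int)] :=
      PySem.List.pyRange_one_succ_right (by omega)
    have hcast : ((k + 1 : Nat) : Int) = (k : Int) + 1 := by push_cast; ring
    rw [hcast, hsplit, List.foldl_append, ih]
    simp only [List.foldl_cons, List.foldl_nil]
    cases hget : d.get? ((k : Int), x) with
    | some v =>
      simp only [pvStepB, hget]
      exact pvStepB_tail x d hx k v (pvF_of_get x d _ v hget).symm
    | none =>
      simp only [pvStepB, hget]
      by_cases hkx : (k : Int) ≤ x
      · simp only [if_pos hkx]
        refine pvStepB_tail x d hx k _ ?_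
        rw [pvF.eq_def, hget]; simp [hkx]
      · simp only [if_neg hkx]
        refine pvStepB_tail x d hx k _ ?_
        rw [pvF.eq_def, hget]
        simp only [dif_neg hkx]
        exact (pvF_window x d hx k (by omega)).symm

theorem pvAlt_eq_pvF (n x : Int) (memo : Option (List (Int × Int × Int))) :
    calculate_An_x_alt n x memo = pvF x (pvMemoB memo) n := by
  simp only [calculate_An_x_alt]
  cases hget : (pvMemoB memo).get? (n, x) with
  | some v => exact (pvF_of_get x (pvMemoB memo) n v hget).symm
  | none =>
    by_cases hnx : n ≤ x
    · rw [if_pos hnx, pvF.eq_def, hget]; simp [hnx]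
    · rw [if_neg hnx]
      by_cases hxneg : x < 0
      · rw [if_pos hxneg, pvF.eq_def, hget]
        simp only [dif_neg hnx]
        rw [PySem.List.pyRange_one_eq_nil (by omega)]
        rfl
      · rw [if_neg hxneg]
        have hx : 0 ≤ x := by omega
        have hcast : n + 1 = ((n.toNat + 1 : Nat) : Int) := by omega
        rw [hcast, pvB_loop x (pvMemoB memo) hx (n.toNat + 1)]
        have hn' : n = ((n.toNat : Nat) : Int) := by omega
        rw [hn', PySem.List.pyGetD_natCast,
            PySem.List.getD_map_range _ _ _ 0 (by omega)]

-- ===== VERDICT (by name: the statement is the Claim_ definition above) =====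
theorem calculate_An_x_spec : Claim_equal_calculate_An_x := by
  intro n x memo _ _
  unfold Spec_calculate_An_x
  rw [pvAlt_eq_pvF]
  unfold calculate_An_x
  rw [show pvMemoA memo = pvMemoB memo from rfl]
  have hInv0 : pvInv x (pvMemoB memo) (pvMemoB memo) := fun m =>
    ⟨fun _ hv => hv, fun v hv => (pvF_of_get x (pvMemoB memo) m v hv).symm⟩
  exact (pvGoA_correct x (pvMemoB memo) n.toNat n (pvMemoB memo) (le_refl _) hInv0).1
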